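-- pv_equiv track=rewrite | github.com/rafaelurben/django-kmuhelper | kmuhelper/utils.py | modulo10rekursiv
-- ===== SOURCE A (Python) =====
-- def modulo10rekursiv(strNummer):
--     intTabelle = [
--         [0,9,4,6,8,2,7,1,3,5],
--         [9,4,6,8,2,7,1,3,5,0],
--         [4,6,8,2,7,1,3,5,0,9],
--         [6,8,2,7,1,3,5,0,9,4],
--         [8,2,7,1,3,5,0,9,4,6],
--         [2,7,1,3,5,0,9,4,6,8],
--         [7,1,3,5,0,9,4,6,8,2],
--         [1,3,5,0,9,4,6,8,2,7],
--         [3,5,0,9,4,6,8,2,7,1],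
--         [5,0,9,4,6,8,2,7,1,3],
--     ]
--     strNummer = strNummer.replace(" ","")
--     uebertrag = 0
--     for num in strNummer:
--         uebertrag = intTabelle[uebertrag][int(num)]
--     return [0,9,8,7,6,5,4,3,2,1][uebertrag]
-- ===== SOURCE B (Python) =====
-- def modulo10rekursiv(strNummer):
--     p = [0, 9, 4, 6, 8, 2, 7, 1, 3, 5]
--     # g[c] = check digit the automaton would output if the remaining suffix
--     # were processed starting from carry c; fold the string right-to-left.
--     g = [(10 - c) % 10 for c in range(10)]
--     for num in reversed(strNummer.replace(" ", "")):
--         d = int(num)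
--         g = [g[p[(c + d) % 10]] for c in range(10)]
--     return g[0]
-- ===== Notes on version B (the rewrite author's own statement) =====
-- stated objective: alternative
-- what changed: Instead of running the carry automaton left-to-right with a scalar carry and a 10x10 table, B folds the string right-to-left maintaining a 10-entry continuation table g (g[c] = check digit for the remaining suffix starting from carry c), composing the per-digit transition into g and reading off g[0] at the end.
import Mathlib
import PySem

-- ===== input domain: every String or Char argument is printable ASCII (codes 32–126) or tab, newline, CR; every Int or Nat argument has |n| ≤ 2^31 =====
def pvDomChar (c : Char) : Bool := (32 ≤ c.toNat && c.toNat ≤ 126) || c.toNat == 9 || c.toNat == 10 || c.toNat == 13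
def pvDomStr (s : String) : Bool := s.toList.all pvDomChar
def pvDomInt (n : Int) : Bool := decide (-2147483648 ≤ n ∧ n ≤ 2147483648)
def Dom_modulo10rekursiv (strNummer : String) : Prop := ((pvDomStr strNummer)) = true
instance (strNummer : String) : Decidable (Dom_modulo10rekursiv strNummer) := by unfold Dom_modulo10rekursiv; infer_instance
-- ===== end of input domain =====

-- B replaces A's left-to-right scalar-carry automaton over a 10x10 table by a
-- right-to-left fold that composes each digit's transition into a 10-entry
-- continuation table g (g[c] = answer for the suffix from carry c), then reads g[0].

-- ===== PORT A =====
-- the step of A's loop: uebertrag = intTabelle[uebertrag][int(num)]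
def pvStepA (intTabelle : List (List Int)) (u : Int) (c : Char) : Int :=
  (PySem.List.pyGet? ((PySem.List.pyGet? intTabelle u).getD [])
      ((PySem.Int.ofStr? (String.mk [c])).getD 0)).getD 0

def modulo10rekursiv (strNummer : String) : Int :=
  let intTabelle : List (List Int) := [
    [0,9,4,6,8,2,7,1,3,5],
    [9,4,6,8,2,7,1,3,5,0],
    [4,6,8,2,7,1,3,5,0,9],
    [6,8,2,7,1,3,5,0,9,4],
    [8,2,7,1,3,5,0,9,4,6],
    [2,7,1,3,5,0,9,4,6,8],
    [7,1,3,5,0,9,4,6,8,2],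
    [1,3,5,0,9,4,6,8,2,7],
    [3,5,0,9,4,6,8,2,7,1],
    [5,0,9,4,6,8,2,7,1,3]]
  let s := PySem.Str.replace strNummer " " ""
  let uebertrag : Int := s.toList.foldl (pvStepA intTabelle) 0
  (PySem.List.pyGet? ([0,9,8,7,6,5,4,3,2,1] : List Int) uebertrag).getD 0

-- ===== PORT B =====
-- p = [0,9,4,6,8,2,7,1,3,5]
def pvPB : List Int := [0,9,4,6,8,2,7,1,3,5]

-- the step of B's loop: g = [g[p[(c + d) % 10]] for c in range(10)]
def pvStepB (g : List Int) (ch : Char) : List Int :=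
  let d : Int := (PySem.Int.ofStr? (String.mk [ch])).getD 0
  (PySem.List.pyRange 0 10 1).map (fun c =>
    PySem.List.pyGetD g (PySem.List.pyGetD pvPB (PySem.Int.mod (c + d) 10) 0) 0)

def modulo10rekursiv_alt (strNummer : String) : Int :=
  -- g = [(10 - c) % 10 for c in range(10)]
  let g0 : List Int := (PySem.List.pyRange 0 10 1).map (fun c => PySem.Int.mod (10 - c) 10)
  let t := (PySem.Str.replace strNummer " " "").toList.reverse
  let g : List Int := t.foldl pvStepB g0
  PySem.List.pyGetD g 0 0

-- ===== PRECONDITION & SPEC =====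
-- Pre_ excludes exactly the inputs where A raises ValueError: any character other
-- than a decimal digit or a space makes int(num) fail on that single character
-- (spaces are removed before the loop).
def Pre_modulo10rekursiv (strNummer : String) : Prop :=
  strNummer.toList.all
    (fun c => c ∈ ([' ','0','1','2','3','4','5','6','7','8','9'] : List Char)) = true
instance (strNummer : String) : Decidable (Pre_modulo10rekursiv strNummer) := by
  unfold Pre_modulo10rekursiv; infer_instance
def pvWitness_modulo10rekursiv : String := "123 456"

def Spec_modulo10rekursiv (strNummer : String) (out : Int) : Prop := out = modulo10rekursiv_alt strNummer
instance (strNummer : String) (out : Int) : Decidable (Spec_modulo10rekursiv strNummer out) := by unfold Spec_modulo10rekursiv; infer_instance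

-- ===== CLAIM =====
def Claim_equal_modulo10rekursiv : Prop := ∀ (strNummer : String), Dom_modulo10rekursiv strNummer → Pre_modulo10rekursiv strNummer → Spec_modulo10rekursiv strNummer (modulo10rekursiv strNummer)

-- ===== LEMMAS AND PROOFS =====

def pvTableA : List (List Int) := [
    [0,9,4,6,8,2,7,1,3,5],
    [9,4,6,8,2,7,1,3,5,0],
    [4,6,8,2,7,1,3,5,0,9],
    [6,8,2,7,1,3,5,0,9,4],
    [8,2,7,1,3,5,0,9,4,6],
    [2,7,1,3,5,0,9,4,6,8],
    [7,1,3,5,0,9,4,6,8,2],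
    [1,3,5,0,9,4,6,8,2,7],
    [3,5,0,9,4,6,8,2,7,1],
    [5,0,9,4,6,8,2,7,1,3]]

def pvFinalA (u : Int) : Int :=
  (PySem.List.pyGet? ([0,9,8,7,6,5,4,3,2,1] : List Int) u).getD 0

-- every character produced by str.replace(" ", "") was a character of the input
theorem mem_replace_go (fuel : Nat) :
    ∀ (l acc : List Char) (x : Char),
      x ∈ PySem.Chars.replace.go [' '] [] fuel l acc → x ∈ l ∨ x ∈ acc := by
  induction fuel with
  | zero =>
      intro l acc x h
      simp [PySem.Chars.replace.go] at h
      tauto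
  | succ n ih =>
      intro l acc x h
      cases l with
      | nil => simp [PySem.Chars.replace.go] at h; tauto
      | cons c t =>
          simp only [PySem.Chars.replace.go] at h
          split at h
          · rcases ih _ _ _ h with h' | h'
            · exact Or.inl (List.mem_of_mem_drop h')
            · simp at h'; tauto
          · rcases ih _ _ _ h with h' | h'
            · exact Or.inl (List.mem_cons_of_mem _ h')
            · rcases List.mem_cons.mp h' with rfl | h''
              · exact Or.inl List.mem_cons_self
              · tauto

theorem mem_replace (s : List Char) (x : Char)
    (h : x ∈ PySem.Chars.replace s [' '] []) : x ∈ s := by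
  simp only [PySem.Chars.replace] at h
  rcases mem_replace_go s.length s [] x h with h' | h'
  · exact h'
  · simp at h'

-- the digit value used by both loops is in [0, 10) for every admitted character
theorem digit_range (c : Char)
    (hc : c ∈ ([' ','0','1','2','3','4','5','6','7','8','9'] : List Char)) :
    0 ≤ (PySem.Int.ofStr? (String.mk [c])).getD 0 ∧
      (PySem.Int.ofStr? (String.mk [c])).getD 0 < 10 := by
  fin_cases hc <;> decide

-- A's table step equals looking up p at (u + d) % 10, and the result stays in [0, 10)
theorem stepA_eq (u d : Int) (hu0 : 0 ≤ u) (hu : u < 10) (hd0 : 0 ≤ d) (hd : d < 10) :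
    ((PySem.List.pyGet? ((PySem.List.pyGet? pvTableA u).getD []) d).getD 0
      = PySem.List.pyGetD pvPB (PySem.Int.mod (u + d) 10) 0) ∧
    0 ≤ PySem.List.pyGetD pvPB (PySem.Int.mod (u + d) 10) 0 ∧
    PySem.List.pyGetD pvPB (PySem.Int.mod (u + d) 10) 0 < 10 := by
  interval_cases u <;> interval_cases d <;> decide

-- indexing B's comprehension [f(c) for c in range(10)] at u ∈ [0,10) yields f u
theorem comp_get (f : Int → Int) (u : Int) (h0 : 0 ≤ u) (h1 : u < 10) :
    PySem.List.pyGetD ((PySem.List.pyRange 0 10 1).map f) u 0 = f u :=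
  PySem.List.pyGetD_map_pyRange_of_nonneg f 10 u 0 h0 h1

-- one entry of B's updated table: pyGetD (pvStepB g c) u 0 = pyGetD g (p[(u+d)%10]) 0
theorem stepB_get (g : List Int) (c : Char) (u : Int) (h0 : 0 ≤ u) (h1 : u < 10) :
    PySem.List.pyGetD (pvStepB g c) u 0
      = PySem.List.pyGetD g
          (PySem.List.pyGetD pvPB
            (PySem.Int.mod (u + (PySem.Int.ofStr? (String.mk [c])).getD 0) 10) 0) 0 := by
  unfold pvStepB
  exact comp_get _ u h0 h1

-- invariant: after folding the reversed suffix l into g0, entry u of the table is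
-- the value A's automaton produces on l started from carry u
theorem inv_fold (l : List Char)
    (hl : ∀ c ∈ l, c ∈ ([' ','0','1','2','3','4','5','6','7','8','9'] : List Char)) :
    ∀ u : Int, 0 ≤ u → u < 10 →
      PySem.List.pyGetD
        (l.reverse.foldl pvStepB
          ((PySem.List.pyRange 0 10 1).map (fun c => PySem.Int.mod (10 - c) 10))) u 0
        = pvFinalA (l.foldl (pvStepA pvTableA) u) := by
  induction l with
  | nil =>
      intro u h0 h1
      rw [List.reverse_nil, List.foldl_nil, List.foldl_nil,
        comp_get _ u h0 h1]
      interval_cases u <;> decide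
  | cons c t ih =>
      intro u h0 h1
      have hc := hl c List.mem_cons_self
      have ht : ∀ c' ∈ t, c' ∈ ([' ','0','1','2','3','4','5','6','7','8','9'] : List Char) :=
        fun c' hc' => hl c' (List.mem_cons_of_mem _ hc')
      obtain ⟨hd0, hd1⟩ := digit_range c hc
      obtain ⟨heq, hv0, hv1⟩ :=
        stepA_eq u ((PySem.Int.ofStr? (String.mk [c])).getD 0) h0 h1 hd0 hd1
      rw [List.reverse_cons, List.foldl_append, List.foldl_cons, List.foldl_nil,
        stepB_get _ c u h0 h1, ih ht _ hv0 hv1, List.foldl_cons]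
      unfold pvStepA
      rw [heq]

-- ===== VERDICT =====
theorem modulo10rekursiv_spec : Claim_equal_modulo10rekursiv := by
  intro s _ hpre
  unfold Spec_modulo10rekursiv modulo10rekursiv modulo10rekursiv_alt
  simp only []
  have hmem : ∀ c ∈ (PySem.Str.replace s " " "").toList,
      c ∈ ([' ','0','1','2','3','4','5','6','7','8','9'] : List Char) := by
    intro c hc
    rw [PySem.Str.toList_replace] at hc
    have : c ∈ s.toList := mem_replace s.toList c hc
    unfold Pre_modulo10rekursiv at hpre
    simpa using List.all_eq_true.mp hpre c this
  have h := inv_fold (PySem.Str.replace s " " "").toList hmem 0 (by decide) (by decide)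
  rw [h]
  unfold pvFinalA
  rfl
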